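-- pv_equiv track=rewrite | github.com/varkirsova/alg_2sem_lab2 | task2_4.py | coding_varible_length_ac
-- ===== SOURCE A (Python) =====
-- def coding_varible_length_ac(ac):
--     res = []
--     zeros = 0
--     for i in ac:
--         if i == 0:
--             zeros += 1
--             if zeros == 16:
--                 res.append((0xF0, ""))
--                 zeros = 0
--
--         else:
--             abs_val = int(abs(i))
--             size = abs_val.bit_length()
--
--             runsize = (zeros << 4) | size
--             if i > 0:
--                 amplitude = format(i, f'0{size}b')
--             else:
--                 a = format(abs_val, f'0{size}b')
--                 amplitude = ''.join('1' if b == '0' else '0' for b in a)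
--
--             res.append((runsize, amplitude))
--             zeros = 0
--     if zeros > 0:
--         res.append((0x00, ""))
--
--     return res
-- ===== SOURCE B (Python) =====
-- def coding_varible_length_ac(ac):
--     res = []
--     n = len(ac)
--     i = 0
--     while i < n:
--         j = i
--         while j < n and ac[j] == 0:
--             j += 1
--         k = j - i                      # length of this zero run
--         res.extend([(0xF0, "")] * (k // 16))
--         if j == n:                     # trailing run of zeros
--             if k % 16:
--                 res.append((0x00, ""))
--         else:
--             v = ac[j]
--             abs_val = abs(v)
--             size = abs_val.bit_length()
--             if v > 0:
--                 amplitude = format(v, f'0{size}b')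
--             else:
--                 amplitude = ''.join('1' if b == '0' else '0'
--                                     for b in format(abs_val, f'0{size}b'))
--             res.append((((k % 16) << 4) | size, amplitude))
--         i = j + 1
--     return res
-- ===== Notes on version B (the rewrite author's own statement) =====
-- stated objective: alternative
-- what changed: B processes the coefficient list run-by-run: it measures each zero run at once, emits run//16 ZRL markers and the run-length/size symbol (or the trailing EOB) directly from the run length, instead of A's element-by-element zero counter that resets at 16.
import Mathlib
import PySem

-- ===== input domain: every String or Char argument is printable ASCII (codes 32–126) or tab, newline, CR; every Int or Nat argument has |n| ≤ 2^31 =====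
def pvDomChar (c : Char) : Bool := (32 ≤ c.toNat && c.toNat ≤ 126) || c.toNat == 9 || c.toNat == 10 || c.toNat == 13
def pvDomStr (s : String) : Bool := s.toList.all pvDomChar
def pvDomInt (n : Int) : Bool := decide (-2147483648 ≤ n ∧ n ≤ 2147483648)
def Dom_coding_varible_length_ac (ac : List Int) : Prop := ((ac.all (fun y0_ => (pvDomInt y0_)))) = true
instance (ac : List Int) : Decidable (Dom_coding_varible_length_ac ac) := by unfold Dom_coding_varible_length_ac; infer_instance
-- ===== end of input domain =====

-- B re-implements the JPEG AC run-length coder run-by-run (emit ZRLs/EOB per zero run)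
-- instead of A's per-element zero counter; objective: alternative decomposition, same cost.

-- ===== PORT A =====

-- Python's abs_val.bit_length(): number of bits, 0 for 0.
def bitLength : Nat → Nat
  | 0 => 0
  | n + 1 => bitLength ((n + 1) / 2) + 1

-- binary digits of n, least significant first ([] for 0)
def natBinRev : Nat → List Char
  | 0 => []
  | n + 1 => (if (n + 1) % 2 = 1 then '1' else '0') :: natBinRev ((n + 1) / 2)

-- Python's format(n, f'0{w}b'): binary of n, left-padded with '0' to width w
def padBin (n w : Nat) : String :=
  let ds := (natBinRev n).reverse
  let ds := if ds.isEmpty then ['0'] else ds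
  String.mk (List.replicate (w - ds.length) '0' ++ ds)

-- A's ''.join('1' if b == '0' else '0' for b in a)
def flipBits (s : String) : String :=
  String.mk (s.toList.map fun c => if c = '0' then '1' else '0')

-- one iteration of A's for-loop; state = (res, zeros).  zeros is a nonnegative
-- Python int kept as Nat; (zeros << 4) | size is computed in Nat and cast (exact: both nonneg).
def stepA (st : List (Int × String) × Nat) (i : Int) : List (Int × String) × Nat :=
  if i = 0 then
    (if st.2 + 1 = 16 then (st.1 ++ [((240 : Int), "")], 0) else (st.1, st.2 + 1))
  else
    let absVal := i.natAbs
    let size := bitLength absVal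
    let runsize : Int := Int.ofNat ((st.2 <<< 4) ||| size)
    let amplitude := if 0 < i then padBin absVal size else flipBits (padBin absVal size)
    (st.1 ++ [(runsize, amplitude)], 0)

def coding_varible_length_ac (ac : List Int) : List (Int × String) :=
  let st := ac.foldl stepA ([], 0)
  if st.2 > 0 then st.1 ++ [((0 : Int), "")] else st.1

-- ===== PORT B =====

-- B walks the list run-by-run; its loop index i is represented by the remaining
-- suffix ac[i:], the inner counting loop by takeWhile, ac[j] by the head after the run,
-- and 'i = j + 1' by dropping the run and the nonzero element.
def coding_varible_length_ac_alt (ac : List Int) : List (Int × String) :=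
  let k := (ac.takeWhile (fun x => x == 0)).length
  List.replicate (k / 16) ((240 : Int), "") ++
    (if k = ac.length then
      (if k % 16 ≠ 0 then [((0 : Int), "")] else [])
    else
      match h : ac.drop k with
      | [] => []
      | v :: tl =>
        let absVal := v.natAbs
        let size := bitLength absVal
        let amplitude := if 0 < v then padBin absVal size else flipBits (padBin absVal size)
        (Int.ofNat (((k % 16) <<< 4) ||| size), amplitude) :: coding_varible_length_ac_alt tl)
termination_by ac.length
decreasing_by
  have hlen := congrArg List.length h
  simp [List.length_drop] at hlen
  omega

-- ===== PRECONDITION & SPEC =====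
def Spec_coding_varible_length_ac (ac : List Int) (out : List (Int × String)) : Prop := out = coding_varible_length_ac_alt ac
instance (ac : List Int) (out : List (Int × String)) : Decidable (Spec_coding_varible_length_ac ac out) := by unfold Spec_coding_varible_length_ac; infer_instance

-- ===== CLAIM (what is proved, stated in full; the proofs are below) =====
def Claim_equal_coding_varible_length_ac : Prop := ∀ (ac : List Int), Dom_coding_varible_length_ac ac → Spec_coding_varible_length_ac ac (coding_varible_length_ac ac)

-- ===== LEMMAS AND PROOFS =====

-- A's run with initial zero-counter z, finished off by the trailing-EOB rule.
def finishA (ac : List Int) (z : Nat) : List (Int × String) :=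
  let st := ac.foldl stepA ([], z)
  if st.2 > 0 then st.1 ++ [((0 : Int), "")] else st.1

-- common recursive specification: pending-zeros z, structural on the list
def altGoZ (z : Nat) : List Int → List (Int × String)
  | [] => List.replicate (z / 16) ((240 : Int), "") ++
      (if z % 16 ≠ 0 then [((0 : Int), "")] else [])
  | i :: t =>
    if i = 0 then altGoZ (z + 1) t
    else
      let size := bitLength i.natAbs
      List.replicate (z / 16) ((240 : Int), "") ++
        ((Int.ofNat (((z % 16) <<< 4) ||| size),
          if 0 < i then padBin i.natAbs size else flipBits (padBin i.natAbs size)) :: altGoZ 0 t)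

theorem takeWhile_length_le (p : Int → Bool) (l : List Int) :
    (l.takeWhile p).length ≤ l.length := by
  induction l with
  | nil => simp
  | cons a t ih =>
    rw [List.takeWhile_cons]
    cases p a <;> simp <;> omega

theorem foldl_stepA_shift (l : List Int) (r : List (Int × String)) (z : Nat) :
    List.foldl stepA (r, z) l
      = (r ++ (List.foldl stepA ([], z) l).1, (List.foldl stepA ([], z) l).2) := by
  induction l generalizing r z with
  | nil => simp
  | cons i t ih =>
    simp only [List.foldl_cons]
    by_cases hi : i = 0
    · by_cases hz : z + 1 = 16
      · have e1 : stepA (r, z) i = (r ++ [((240 : Int), "")], 0) := by simp [stepA, hi, hz]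
        have e2 : stepA (([] : List (Int × String)), z) i = ([((240 : Int), "")], 0) := by
          simp [stepA, hi, hz]
        rw [e1, e2, ih (r ++ [((240 : Int), "")]) 0, ih [((240 : Int), "")] 0]
        simp
      · have e1 : stepA (r, z) i = (r, z + 1) := by simp [stepA, hi, hz]
        have e2 : stepA (([] : List (Int × String)), z) i = ([], z + 1) := by
          simp [stepA, hi, hz]
        rw [e1, e2]
        exact ih r (z + 1)
    · have e1 : stepA (r, z) i
          = (r ++ [(Int.ofNat ((z <<< 4) ||| bitLength i.natAbs),
              if 0 < i then padBin i.natAbs (bitLength i.natAbs)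
              else flipBits (padBin i.natAbs (bitLength i.natAbs)))], 0) := by
        simp [stepA, hi]
      have e2 : stepA (([] : List (Int × String)), z) i
          = ([(Int.ofNat ((z <<< 4) ||| bitLength i.natAbs),
              if 0 < i then padBin i.natAbs (bitLength i.natAbs)
              else flipBits (padBin i.natAbs (bitLength i.natAbs)))], 0) := by
        simp [stepA, hi]
      rw [e1, e2,
        ih (r ++ [(Int.ofNat ((z <<< 4) ||| bitLength i.natAbs),
              if 0 < i then padBin i.natAbs (bitLength i.natAbs)
              else flipBits (padBin i.natAbs (bitLength i.natAbs)))]) 0,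
        ih [(Int.ofNat ((z <<< 4) ||| bitLength i.natAbs),
              if 0 < i then padBin i.natAbs (bitLength i.natAbs)
              else flipBits (padBin i.natAbs (bitLength i.natAbs)))] 0]
      simp

theorem finishA_nil (z : Nat) :
    finishA [] z = if z > 0 then [((0 : Int), "")] else [] := by
  simp [finishA]

theorem finishA_cons_zero (t : List Int) (z : Nat) :
    finishA (0 :: t) z
      = if z + 1 = 16 then ((240 : Int), "") :: finishA t 0 else finishA t (z + 1) := by
  by_cases hz : z + 1 = 16
  · simp only [finishA, List.foldl_cons, stepA, if_pos rfl, if_pos hz, hz]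
    rw [foldl_stepA_shift]
    by_cases h : (List.foldl stepA ([], 0) t).2 > 0 <;> simp [h]
  · simp [finishA, stepA, hz]

theorem finishA_cons_nonzero (v : Int) (t : List Int) (z : Nat) (hv : v ≠ 0) :
    finishA (v :: t) z
      = (Int.ofNat ((z <<< 4) ||| bitLength v.natAbs),
          if 0 < v then padBin v.natAbs (bitLength v.natAbs)
          else flipBits (padBin v.natAbs (bitLength v.natAbs))) :: finishA t 0 := by
  simp only [finishA, List.foldl_cons, stepA, if_neg hv]
  rw [foldl_stepA_shift]
  by_cases h : (List.foldl stepA ([], 0) t).2 > 0 <;> simp [h]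

-- shifting the pending counter by a full block of 16 emits exactly one ZRL
theorem altGoZ_add16 (t : List Int) (z : Nat) :
    altGoZ (z + 16) t = ((240 : Int), "") :: altGoZ z t := by
  induction t generalizing z with
  | nil =>
    have h1 : (z + 16) / 16 = z / 16 + 1 := by omega
    have h2 : (z + 16) % 16 = z % 16 := by omega
    rw [altGoZ, altGoZ, h1, h2, List.replicate_succ, List.cons_append]
  | cons i t ih =>
    by_cases hi : i = 0
    · have h3 : z + 16 + 1 = (z + 1) + 16 := by omega
      rw [altGoZ, if_pos hi, h3, ih, altGoZ, if_pos hi]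
    · have h1 : (z + 16) / 16 = z / 16 + 1 := by omega
      have h2 : (z + 16) % 16 = z % 16 := by omega
      rw [altGoZ, if_neg hi, altGoZ, if_neg hi, h1, h2, List.replicate_succ, List.cons_append]

-- A's counter loop equals the common specification
theorem finishA_eq_altGoZ (l : List Int) (z : Nat) (hz : z < 16) :
    finishA l z = altGoZ z l := by
  induction l generalizing z with
  | nil =>
    have h1 : z / 16 = 0 := by omega
    have h2 : z % 16 = z := by omega
    rw [finishA_nil]
    by_cases h : z > 0 <;> simp [altGoZ, h1, h2, h] <;> omega
  | cons i t ih =>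
    by_cases hi : i = 0
    · subst hi
      rw [finishA_cons_zero]
      by_cases hz1 : z + 1 = 16
      · have h16 : z + 1 = 0 + 16 := by omega
        rw [if_pos hz1, altGoZ, if_pos rfl, h16, altGoZ_add16, ih 0 (by omega)]
      · rw [if_neg hz1, altGoZ, if_pos rfl]
        exact ih (z + 1) (by omega)
    · rw [finishA_cons_nonzero _ _ _ hi]
      have h1 : z / 16 = 0 := by omega
      have h2 : z % 16 = z := by omega
      simp [altGoZ, hi, h1, h2, ih 0 (by omega)]

-- the run-based altGoZ characterisation used to bridge to B's run-at-a-time recursion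
theorem altGoZ_runs (l : List Int) (z : Nat) :
    altGoZ z l
      = List.replicate ((z + (l.takeWhile (fun x => x == 0)).length) / 16) ((240 : Int), "") ++
          (match l.drop (l.takeWhile (fun x => x == 0)).length with
           | [] =>
             if (z + (l.takeWhile (fun x => x == 0)).length) % 16 ≠ 0 then [((0 : Int), "")] else []
           | v :: tl =>
             (Int.ofNat ((((z + (l.takeWhile (fun x => x == 0)).length) % 16) <<< 4) |||
                 bitLength v.natAbs),
               if 0 < v then padBin v.natAbs (bitLength v.natAbs)
               else flipBits (padBin v.natAbs (bitLength v.natAbs))) :: altGoZ 0 tl) := by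
  induction l generalizing z with
  | nil => simp [altGoZ]
  | cons i t ih =>
    by_cases hi : i = 0
    · subst hi
      have hk : List.takeWhile (fun x => x == 0) ((0 : Int) :: t)
          = 0 :: List.takeWhile (fun x => x == 0) t := by
        rw [List.takeWhile_cons]; simp
      rw [altGoZ, if_pos rfl, hk, List.length_cons, List.drop_succ_cons, ih (z + 1)]
      have harith : z + 1 + (List.takeWhile (fun x => x == 0) t).length
          = z + ((List.takeWhile (fun x => x == 0) t).length + 1) := by omega
      rw [harith]
    · have hb : (i == 0) = false := by simpa using hi
      have hk : List.takeWhile (fun x => x == 0) (i :: t) = [] := by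
        rw [List.takeWhile_cons, hb]; rfl
      rw [altGoZ, if_neg hi, hk]
      simp

-- B's run-at-a-time recursion equals the common specification
theorem alt_eq_altGoZ (l : List Int) : coding_varible_length_ac_alt l = altGoZ 0 l := by
  induction l using coding_varible_length_ac_alt.induct with
  | _ l k ih =>
    rw [coding_varible_length_ac_alt, altGoZ_runs]
    simp only [Nat.zero_add]
    have hkle : (l.takeWhile (fun x => x == 0)).length ≤ l.length :=
      takeWhile_length_le _ l
    by_cases hend : (l.takeWhile (fun x => x == 0)).length = l.length
    · have hdrop : l.drop (l.takeWhile (fun x => x == 0)).length = [] := by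
        rw [List.drop_eq_nil_iff]; omega
      simp [hend, hdrop]
    · simp only [if_neg hend]
      cases hd : l.drop (l.takeWhile (fun x => x == 0)).length with
      | nil =>
        exfalso
        rw [List.drop_eq_nil_iff] at hd
        omega
      | cons v tl =>
        simp [ih v tl hd]

-- ===== VERDICT (by name: the statement is the Claim_ definition above) =====
theorem coding_varible_length_ac_spec : Claim_equal_coding_varible_length_ac := by
  intro ac _
  show coding_varible_length_ac ac = coding_varible_length_ac_alt ac
  have hA : coding_varible_length_ac ac = finishA ac 0 := rfl
  rw [hA, finishA_eq_altGoZ ac 0 (by omega), alt_eq_altGoZ]
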